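-- pv_equiv track=rewrite | github.com/Lord0fTurk/RPGMLocalizer | src/core/parsers/ruby_parser.py | _looks_like_textual_value
-- ===== SOURCE A (Python) =====
-- def _looks_like_textual_value(value: str) -> bool:
--     """Return True when a value resembles user-visible text."""
--     if not isinstance(value, str):
--         return False
--     stripped = value.strip()
--     if not stripped:
--         return False
--     if ' ' in stripped:
--         return True
--     if any(ord(char) > 127 for char in stripped):
--         return True
--     return any(marker in stripped for marker in ('!', '?', '.', ':', ';', '%')) and len(stripped) >= 4
-- ===== SOURCE B (Python) =====
-- def _looks_like_textual_value(value: str) -> bool: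
--     """Return True when a value resembles user-visible text."""
--     if not isinstance(value, str):
--         return False
--     stripped = value.strip()
--     if not stripped:
--         return False
--     best = max(_evidence_rank(char) for char in stripped)
--     return best == 2 or (best == 1 and len(stripped) >= 4)
--
--
-- def _evidence_rank(char: str) -> int:
--     """Score a character: 2 = decisive evidence (space / non-ASCII),
--     1 = weak evidence (sentence punctuation), 0 = none."""
--     if char == ' ' or ord(char) > 127:
--         return 2
--     if char in '!?.:;%':
--         return 1
--     return 0
-- ===== Notes on version B (the rewrite author's own statement) =====
-- stated objective: alternative
-- what changed: Replaces A's three separate short-circuiting boolean scans with a numeric scoring scheme: each character is mapped to an evidence rank (2 = space/non-ASCII, 1 = sentence punctuation, 0 = none), the maximum rank over the stripped string is taken, and the result is thresholded (max==2, or max==1 with length>=4).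
import Mathlib
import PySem

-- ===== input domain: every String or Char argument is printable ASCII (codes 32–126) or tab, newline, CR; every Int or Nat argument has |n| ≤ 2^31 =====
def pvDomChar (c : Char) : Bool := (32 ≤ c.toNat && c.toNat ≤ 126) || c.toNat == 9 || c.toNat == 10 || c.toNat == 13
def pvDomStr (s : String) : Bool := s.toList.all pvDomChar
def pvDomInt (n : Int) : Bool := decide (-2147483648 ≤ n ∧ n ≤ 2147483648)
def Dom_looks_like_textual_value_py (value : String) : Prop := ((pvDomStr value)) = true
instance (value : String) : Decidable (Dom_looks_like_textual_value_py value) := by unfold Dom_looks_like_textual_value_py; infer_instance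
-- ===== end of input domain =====

-- B replaces A's three separate boolean scans by a numeric evidence score per character
-- reduced with max and then thresholded (alternative decomposition, same cost).

-- ===== PORT A =====
-- literal port of A: strip, empty guard, then three separate scans in order
def looks_like_textual_value_py (value : String) : Bool :=
  let stripped := PySem.Chars.strip value.toList
  if stripped.isEmpty then false
  else if PySem.Chars.isIn [' '] stripped then true
  else if stripped.any (fun c => decide (c.toNat > 127)) then true
  else ([(['!'] : List Char), ['?'], ['.'], [':'], [';'], ['%']].any
          (fun m => PySem.Chars.isIn m stripped)) && decide (4 ≤ stripped.length)

-- ===== PORT B =====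
def pvMarkers : List Char := ['!', '?', '.', ':', ';', '%']

-- _evidence_rank: 2 = decisive (space / non-ASCII), 1 = weak (punctuation), 0 = none
def evidence_rank (c : Char) : Nat :=
  if c == ' ' || decide (c.toNat > 127) then 2
  else if pvMarkers.contains c then 1
  else 0

-- strip, empty guard, max of per-character ranks (list nonempty, ranks ≥ 0, so init 0 is exact), threshold
def looks_like_textual_value_py_alt (value : String) : Bool :=
  let stripped := PySem.Chars.strip value.toList
  if stripped.isEmpty then false
  else
    let best := (stripped.map evidence_rank).foldl max 0
    decide (best = 2) || (decide (best = 1) && decide (4 ≤ stripped.length))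

-- ===== PRECONDITION & SPEC =====
def Spec_looks_like_textual_value_py (value : String) (out : Bool) : Prop := out = looks_like_textual_value_py_alt value
instance (value : String) (out : Bool) : Decidable (Spec_looks_like_textual_value_py value out) := by unfold Spec_looks_like_textual_value_py; infer_instance

-- ===== CLAIM (what is proved, stated in full; the proofs are below) =====
def Claim_equal_looks_like_textual_value_py : Prop := ∀ (value : String), Dom_looks_like_textual_value_py value → Spec_looks_like_textual_value_py value (looks_like_textual_value_py value)

-- ===== LEMMAS AND PROOFS =====

theorem pv_single (c : Char) (l : List Char) :
    PySem.Chars.isIn [c] l = l.any (fun ch => ch == c) := by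
  rw [Bool.eq_iff_iff, PySem.Chars.isIn_iff_infix, List.singleton_infix_iff, List.any_eq_true]
  simp

theorem pv_any_or (p q : Char → Bool) (l : List Char) :
    l.any (fun ch => p ch || q ch) = (l.any p || l.any q) := by
  induction l with
  | nil => rfl
  | cons x xs ih => simp [List.any_cons, ih]; ac_rfl

theorem pv_contains_chain : (fun ch => pvMarkers.contains ch) =
    (fun ch => ch == '!' || (ch == '?' || (ch == '.' || (ch == ':' || (ch == ';' || ch == '%'))))) := by
  funext ch
  rw [Bool.eq_iff_iff]
  simp [pvMarkers]

theorem pv_marker_scan (l : List Char) :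
    ([(['!'] : List Char), ['?'], ['.'], [':'], [';'], ['%']].any
        (fun m => PySem.Chars.isIn m l))
    = l.any (fun ch => pvMarkers.contains ch) := by
  simp only [List.any_cons, List.any_nil, pv_single, Bool.or_false]
  rw [pv_contains_chain, pv_any_or, pv_any_or, pv_any_or, pv_any_or, pv_any_or]

-- pulling the accumulator out of a max-fold
theorem pv_fold_max_acc (l : List Nat) (a : Nat) :
    l.foldl max a = max a (l.foldl max 0) := by
  induction l generalizing a with
  | nil => simp
  | cons x xs ih => rw [List.foldl_cons, List.foldl_cons, ih (max a x), ih (max 0 x)]; omega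

-- the max of the ranks, characterised by the two boolean scans
theorem pv_best_spec (l : List Char) :
    (l.map evidence_rank).foldl max 0
    = (if l.any (fun c => evidence_rank c == 2) then 2
       else if l.any (fun c => evidence_rank c == 1) then 1 else 0) := by
  induction l with
  | nil => simp
  | cons c cs ih =>
    have hr : evidence_rank c = 0 ∨ evidence_rank c = 1 ∨ evidence_rank c = 2 := by
      unfold evidence_rank; split_ifs <;> simp
    rw [List.map_cons, List.foldl_cons, pv_fold_max_acc, ih]
    cases h2 : cs.any (fun c => evidence_rank c == 2) <;>
      cases h1 : cs.any (fun c => evidence_rank c == 1) <;>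
        rcases hr with h | h | h <;>
          simp only [List.any_cons, h, h1, h2,
            Bool.or_false, Bool.or_true, if_true, Nat.max_def] <;> simp

-- pointwise characterisations of the rank tests
theorem pv_rank2_eq : (fun c => evidence_rank c == 2)
    = (fun c => c == ' ' || decide (c.toNat > 127)) := by
  funext c; unfold evidence_rank; split_ifs with h h' <;> simp_all

theorem pv_rank1_of_no2 (l : List Char)
    (h : l.any (fun c => c == ' ' || decide (c.toNat > 127)) = false) :
    l.any (fun c => evidence_rank c == 1) = l.any (fun c => pvMarkers.contains c) := by
  induction l with
  | nil => rfl
  | cons c cs ih =>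
    simp only [List.any_cons] at h ⊢
    obtain ⟨hc, hcs⟩ := Bool.or_eq_false_iff.mp h
    rw [ih hcs]
    congr 1
    unfold evidence_rank
    simp only [hc, Bool.false_eq_true, if_false]
    cases pvMarkers.contains c <;> simp

-- ===== VERDICT (by name: the statement is the Claim_ definition above) =====
theorem looks_like_textual_value_py_spec : Claim_equal_looks_like_textual_value_py := by
  intro value _
  show looks_like_textual_value_py value = looks_like_textual_value_py_alt value
  unfold looks_like_textual_value_py looks_like_textual_value_py_alt
  simp only [pv_single, pv_marker_scan, pv_best_spec, pv_rank2_eq]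
  set l := PySem.Chars.strip value.toList with hl
  by_cases he : l.isEmpty
  · simp [he]
  · simp only [he]
    cases h2 : l.any (fun c => c == ' ' || decide (c.toNat > 127))
    · have h2' := h2
      rw [pv_any_or (fun ch => ch == ' ') (fun c => decide (c.toNat > 127)) l] at h2'
      obtain ⟨hsp, hna⟩ := Bool.or_eq_false_iff.mp h2'
      rw [pv_rank1_of_no2 l h2]
      simp only [hsp, hna, Bool.false_eq_true, if_false]
      cases l.any (fun c => pvMarkers.contains c) <;> simp
    · have h2' := h2
      rw [pv_any_or (fun ch => ch == ' ') (fun c => decide (c.toNat > 127)) l] at h2'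
      rcases Bool.or_eq_true_iff.mp h2' with h | h <;> simp [h]
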